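-- pv_equiv track=rewrite | github.com/tikhomirovd/Tinkoff_ADS | Python/Contest 1/M. count_streaks.py | count_streaks
-- ===== SOURCE A (Python) =====
-- def count_streaks(n, sequence):
--     streaks = []
--     current_streak = 0
--
--     for i in range(n):
--         if sequence[i] == 1:
--             if current_streak != 0:
--                 streaks.append(current_streak)
--             current_streak = 1
--         else:
--             current_streak += 1
--
--     if current_streak != 0:
--         streaks.append(current_streak)
--
--     return len(streaks), streaks
-- ===== SOURCE B (Python) =====
-- def count_streaks(n, sequence):
--     # Two-pass boundary-index formulation: collect marker positions, streaks are their consecutive differences.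
--     if n <= 0:
--         return 0, []
--     boundaries = [0] + [i for i in range(1, n) if sequence[i] == 1]
--     streaks = [b - a for a, b in zip(boundaries, boundaries[1:])] + [n - boundaries[-1]]
--     return len(streaks), streaks
-- ===== Notes on version B (the rewrite author's own statement) =====
-- stated objective: alternative
-- what changed: Replaced A's single accumulator-scan (running streak counter with conditional flushes) by a two-pass formulation: collect the boundary indices (0 plus every position holding a 1), then emit the streaks as consecutive differences of that index list plus the final segment length.
import Mathlib
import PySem

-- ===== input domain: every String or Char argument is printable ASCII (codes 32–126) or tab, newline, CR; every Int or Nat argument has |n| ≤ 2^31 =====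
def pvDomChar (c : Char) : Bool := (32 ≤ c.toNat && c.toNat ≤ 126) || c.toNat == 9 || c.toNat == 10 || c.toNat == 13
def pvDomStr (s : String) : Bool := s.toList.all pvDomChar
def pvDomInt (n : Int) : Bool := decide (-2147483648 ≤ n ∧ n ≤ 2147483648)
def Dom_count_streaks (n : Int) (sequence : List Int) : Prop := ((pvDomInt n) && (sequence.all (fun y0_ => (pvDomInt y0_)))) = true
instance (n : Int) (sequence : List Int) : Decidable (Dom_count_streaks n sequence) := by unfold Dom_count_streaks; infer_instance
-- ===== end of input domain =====

-- B replaces A's accumulator scan by boundary indices + consecutive differences; equivalence of return values (no mutation involved).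

-- ===== PORT A =====
def count_streaks (n : Int) (sequence : List Int) : Int × List Int :=
  let st := (PySem.List.pyRange 0 n 1).foldl
    (fun (acc : List Int × Int) i =>
      if PySem.List.pyGetD sequence i 0 == 1 then
        ((if acc.2 ≠ 0 then acc.1 ++ [acc.2] else acc.1), 1)
      else (acc.1, acc.2 + 1)) ([], 0)
  let streaks := if st.2 ≠ 0 then st.1 ++ [st.2] else st.1
  ((streaks.length : Int), streaks)

-- ===== PORT B =====
def count_streaks_alt (n : Int) (sequence : List Int) : Int × List Int :=
  if n ≤ 0 then (0, [])
  else
    let bs := 0 :: (PySem.List.pyRange 1 n 1).filter (fun i => PySem.List.pyGetD sequence i 0 == 1)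
    let streaks := (bs.zip bs.tail).map (fun p => p.2 - p.1) ++ [n - bs.getLastD 0]
    ((streaks.length : Int), streaks)

-- ===== PRECONDITION & SPEC =====
-- Pre_ excludes exactly the inputs where A raises IndexError: n larger than len(sequence).
def Pre_count_streaks (n : Int) (sequence : List Int) : Prop := n ≤ (sequence.length : Int)
instance (n : Int) (sequence : List Int) : Decidable (Pre_count_streaks n sequence) := by unfold Pre_count_streaks; infer_instance
def pvWitness_count_streaks : Int × List Int := (3, [1, 0, 1])

def Spec_count_streaks (n : Int) (sequence : List Int) (out : Int × List Int) : Prop := out = count_streaks_alt n sequence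
instance (n : Int) (sequence : List Int) (out : Int × List Int) : Decidable (Spec_count_streaks n sequence out) := by unfold Spec_count_streaks; infer_instance

-- ===== CLAIM (what is proved, stated in full; the proofs are below) =====
def Claim_equal_count_streaks : Prop := ∀ (n : Int) (sequence : List Int), Dom_count_streaks n sequence → Pre_count_streaks n sequence → Spec_count_streaks n sequence (count_streaks n sequence)

-- ===== LEMMAS AND PROOFS =====

-- (xs ++ [y]) zipped with its own tail = xs zipped with its tail, plus the pair (last xs, y)
lemma zip_tail_concat (xs : List Int) (y : Int) (hx : xs ≠ []) :
    (xs ++ [y]).zip (xs ++ [y]).tail = xs.zip xs.tail ++ [(xs.getLastD 0, y)] := by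
  induction xs with
  | nil => exact absurd rfl hx
  | cons a t ih =>
    cases t with
    | nil => simp
    | cons b t' =>
      have := ih (by simp)
      simp only [List.cons_append, List.tail_cons, List.zip_cons_cons] at *
      simp [this, List.getLastD]

-- the last boundary recorded among indices < k is itself < k (and the list is nonempty)
lemma lastD_lt (seq : List Int) (k : Nat) (hk : 1 ≤ k) :
    (0 :: (PySem.List.pyRange 1 (k : Int) 1).filter
        (fun i => PySem.List.pyGetD seq i 0 == 1)).getLastD 0 < (k : Int) := by
  set bs := (PySem.List.pyRange 1 (k : Int) 1).filter (fun i => PySem.List.pyGetD seq i 0 == 1) with hbs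
  have hnil : (0 :: bs) ≠ [] := by simp
  have hmem : (0 :: bs).getLastD 0 ∈ (0 :: bs) := by
    rw [List.getLastD_eq_getLast?, List.getLast?_eq_some_getLast hnil, Option.getD_some]
    exact List.getLast_mem hnil
  rcases List.mem_cons.mp hmem with h0 | hmemb
  · rw [h0]; exact_mod_cast hk
  · have := List.mem_filter.mp (hbs ▸ hmemb)
    exact (PySem.List.mem_pyRange_one.mp this.1).2

-- loop invariant: after processing indices 0..k-1 A's state is (consecutive differences of the boundary list, k - last boundary)
lemma loopA_inv (seq : List Int) (k : Nat) (hk : 1 ≤ k) :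
    (PySem.List.pyRange 0 (k : Int) 1).foldl
      (fun (acc : List Int × Int) i =>
        if PySem.List.pyGetD seq i 0 == 1 then
          ((if acc.2 ≠ 0 then acc.1 ++ [acc.2] else acc.1), 1)
        else (acc.1, acc.2 + 1)) ([], 0)
    = (let bs := 0 :: (PySem.List.pyRange 1 (k : Int) 1).filter (fun i => PySem.List.pyGetD seq i 0 == 1)
       ((bs.zip bs.tail).map (fun p => p.2 - p.1), (k : Int) - bs.getLastD 0)) := by
  induction k with
  | zero => omega
  | succ k ih =>
    by_cases hk1 : 1 ≤ k
    · have hcast : ((k + 1 : Nat) : Int) = (k : Int) + 1 := by push_cast; ring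
      rw [hcast, PySem.List.pyRange_one_succ_right (by positivity),
          PySem.List.pyRange_one_succ_right (by exact_mod_cast hk1),
          List.foldl_append, ih hk1, List.filter_append]
      have hlast := lastD_lt seq k hk1
      simp only [List.foldl_cons, List.foldl_nil, List.filter_cons, List.filter_nil]
      by_cases hone : PySem.List.pyGetD seq (k : Int) 0 == 1
      · have hne : (k : Int) - (0 :: (PySem.List.pyRange 1 (k : Int) 1).filter
            (fun i => PySem.List.pyGetD seq i 0 == 1)).getLastD 0 ≠ 0 := by omega
        simp only [hone, if_true]
        rw [if_pos hne, ← List.cons_append,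
            zip_tail_concat _ _ (by simp), List.getLastD_concat]
        simp only [List.map_append, List.map_cons, List.map_nil, Prod.mk.injEq]
        exact ⟨trivial, by omega⟩
      · simp only [hone, Bool.false_eq_true, if_false]
        simp only [List.append_nil, Prod.mk.injEq]
        exact ⟨trivial, by omega⟩
    · have hk0 : k = 0 := by omega
      subst hk0
      rw [show ((1 : Nat) : Int) = 1 from rfl]
      rw [PySem.List.pyRange_one_cons (by norm_num), PySem.List.pyRange_one_eq_nil (by norm_num),
          PySem.List.pyRange_one_eq_nil (le_refl 1)]
      by_cases hone : PySem.List.pyGetD seq 0 0 == 1 <;> simp_all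

-- ===== VERDICT (by name: the statement is the Claim_ definition above) =====
theorem count_streaks_spec : Claim_equal_count_streaks := by
  intro n seq _ _
  unfold Spec_count_streaks count_streaks count_streaks_alt
  by_cases hn : n ≤ 0
  · rw [PySem.List.pyRange_one_eq_nil hn]
    simp [hn]
  · have hk1 : 1 ≤ n.toNat := by omega
    have hcast : ((n.toNat : Nat) : Int) = n := by omega
    rw [← hcast, loopA_inv seq n.toNat hk1]
    have hlast := lastD_lt seq n.toNat hk1
    have hne : ((n.toNat : Int)) -
        (0 :: (PySem.List.pyRange 1 ((n.toNat : Nat) : Int) 1).filter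
          (fun i => PySem.List.pyGetD seq i 0 == 1)).getLastD 0 ≠ 0 := by omega
    simp only [hcast] at *
    simp only [List.getLastD_eq_getLast?] at hne
    simp [hn, hne, List.length_zip]
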